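-- pv_equiv track=rewrite | github.com/FinchMF/AfS-pipe | tools/sp_utils.py | collect_result_ids
-- ===== SOURCE A (Python) =====
-- from typing import List, Dict, TypeVar, Any
--
-- def collect_result_ids(result_data: List[Dict[str, str]]) -> (List[str], List[str], List[str], List[str]):
--
--     """
--     recieves search data and returns ids for each data type
--     --------------------------------------------------------
--
--     The function will return empty lists for each type not contained in the search data
--     """
--     # set lists
--     song_ids = []
--     album_ids = []
--     artist_ids = []
--     playlist_ids = []
--     # iterate through the search data
--     for data in result_data:
--         # check for track types and extract id
--         if data['type'] == 'track':
--
--             song_ids.append(data['id'])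
--         # check for album types and extract id
--         if data['type'] == 'album':
--
--             album_ids.append(data['id'])
--         # check for artist types and extract id
--         if data['type'] == 'artist':
--
--             artist_ids.append(data['id'])
--         # check for playlist types and extract id
--         if data['type'] == 'playlist':
--
--             playlist_ids.append(data['id'])
--
--     return song_ids, album_ids, artist_ids, playlist_ids
-- ===== SOURCE B (Python) =====
-- def collect_result_ids(result_data):
--     """
--     recieves search data and returns ids for each data type
--     --------------------------------------------------------
--
--     The function will return empty lists for each type not contained in the search data
--     """
--     song_ids = [d['id'] for d in result_data if d['type'] == 'track']
--     album_ids = [d['id'] for d in result_data if d['type'] == 'album']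
--     artist_ids = [d['id'] for d in result_data if d['type'] == 'artist']
--     playlist_ids = [d['id'] for d in result_data if d['type'] == 'playlist']
--     return song_ids, album_ids, artist_ids, playlist_ids
-- ===== Notes on version B (the rewrite author's own statement) =====
-- stated objective: simpler
-- what changed: The single stateful loop maintaining four accumulators is replaced by four independent filtering comprehensions, one per result type, each scanning the input once.
import Mathlib
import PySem

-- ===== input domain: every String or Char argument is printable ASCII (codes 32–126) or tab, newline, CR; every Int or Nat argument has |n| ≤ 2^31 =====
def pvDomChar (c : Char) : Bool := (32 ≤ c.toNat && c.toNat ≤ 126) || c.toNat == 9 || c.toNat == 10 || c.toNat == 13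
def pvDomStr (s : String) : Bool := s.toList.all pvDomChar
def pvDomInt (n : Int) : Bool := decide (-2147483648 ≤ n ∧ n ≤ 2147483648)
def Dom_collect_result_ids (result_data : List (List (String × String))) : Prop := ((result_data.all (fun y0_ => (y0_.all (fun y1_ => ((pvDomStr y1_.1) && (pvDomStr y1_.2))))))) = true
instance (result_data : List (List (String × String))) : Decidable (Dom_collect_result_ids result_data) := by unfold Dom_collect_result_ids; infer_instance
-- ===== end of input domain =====

-- B replaces A's single loop with four accumulators by four independent per-type filtering comprehensions (simpler decomposition, same O(n) cost).

-- d[k] for an association-list dict: first match (none = KeyError; excluded by Pre_)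
def aget? (d : List (String × String)) (k : String) : Option String :=
  (d.find? (fun p => p.1 == k)).map Prod.snd

-- ===== PORT A =====
def collect_result_ids (result_data : List (List (String × String))) : List String × List String × List String × List String :=
  let init : List String × List String × List String × List String := ([], [], [], [])
  let fin := result_data.foldl (fun acc data =>
    let (song_ids, album_ids, artist_ids, playlist_ids) := acc
    let song_ids := if (aget? data "type").getD "" == "track" then song_ids ++ [(aget? data "id").getD ""] else song_ids
    let album_ids := if (aget? data "type").getD "" == "album" then album_ids ++ [(aget? data "id").getD ""] else album_ids
    let artist_ids := if (aget? data "type").getD "" == "artist" then artist_ids ++ [(aget? data "id").getD ""] else artist_ids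
    let playlist_ids := if (aget? data "type").getD "" == "playlist" then playlist_ids ++ [(aget? data "id").getD ""] else playlist_ids
    (song_ids, album_ids, artist_ids, playlist_ids)) init
  fin

-- ===== PORT B =====
def collect_result_ids_alt (result_data : List (List (String × String))) : List String × List String × List String × List String :=
  let ids (t : String) : List String :=
    (result_data.filter (fun d => (aget? d "type").getD "" == t)).map (fun d => (aget? d "id").getD "")
  (ids "track", ids "album", ids "artist", ids "playlist")

-- ===== PRECONDITION & SPEC =====
-- Pre_ excludes exactly the inputs on which Python A raises KeyError: a dict without the
-- key 'type', or a dict whose type is one of the four handled ones but which lacks 'id'.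
def Pre_collect_result_ids (result_data : List (List (String × String))) : Prop :=
  (result_data.all (fun d =>
    (aget? d "type").isSome &&
    (!(["track", "album", "artist", "playlist"].contains ((aget? d "type").getD "")) ||
      (aget? d "id").isSome))) = true
instance (result_data : List (List (String × String))) : Decidable (Pre_collect_result_ids result_data) := by unfold Pre_collect_result_ids; infer_instance
def pvWitness_collect_result_ids : (List (List (String × String))) :=
  [[("type", "track"), ("id", "1")], [("type", "album"), ("id", "2")], [("type", "other")]]

def Spec_collect_result_ids (result_data : List (List (String × String))) (out : List String × List String × List String × List String) : Prop := out = collect_result_ids_alt result_data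
instance (result_data : List (List (String × String))) (out : List String × List String × List String × List String) : Decidable (Spec_collect_result_ids result_data out) := by unfold Spec_collect_result_ids; infer_instance

-- ===== CLAIM (what is proved, stated in full; the proofs are below) =====
def Claim_equal_collect_result_ids : Prop := ∀ (result_data : List (List (String × String))), Dom_collect_result_ids result_data → Pre_collect_result_ids result_data → Spec_collect_result_ids result_data (collect_result_ids result_data)

-- ===== LEMMAS AND PROOFS =====

-- loop invariant: A's fold prepends its accumulators to B's per-type selections
theorem collect_fold_eq (rd : List (List (String × String)))
    (s a ar p : List String) :
    rd.foldl (fun acc data =>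
      let (song_ids, album_ids, artist_ids, playlist_ids) := acc
      let song_ids := if (aget? data "type").getD "" == "track" then song_ids ++ [(aget? data "id").getD ""] else song_ids
      let album_ids := if (aget? data "type").getD "" == "album" then album_ids ++ [(aget? data "id").getD ""] else album_ids
      let artist_ids := if (aget? data "type").getD "" == "artist" then artist_ids ++ [(aget? data "id").getD ""] else artist_ids
      let playlist_ids := if (aget? data "type").getD "" == "playlist" then playlist_ids ++ [(aget? data "id").getD ""] else playlist_ids
      (song_ids, album_ids, artist_ids, playlist_ids)) (s, a, ar, p)
    = (s ++ (rd.filter (fun d => (aget? d "type").getD "" == "track")).map (fun d => (aget? d "id").getD ""),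
       a ++ (rd.filter (fun d => (aget? d "type").getD "" == "album")).map (fun d => (aget? d "id").getD ""),
       ar ++ (rd.filter (fun d => (aget? d "type").getD "" == "artist")).map (fun d => (aget? d "id").getD ""),
       p ++ (rd.filter (fun d => (aget? d "type").getD "" == "playlist")).map (fun d => (aget? d "id").getD "")) := by
  induction rd generalizing s a ar p with
  | nil => simp
  | cons d t ih =>
      simp only [List.foldl_cons, List.filter_cons]
      rw [ih]
      by_cases h1 : ((aget? d "type").getD "" == "track") = true <;>
        by_cases h2 : ((aget? d "type").getD "" == "album") = true <;>
          by_cases h3 : ((aget? d "type").getD "" == "artist") = true <;>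
            by_cases h4 : ((aget? d "type").getD "" == "playlist") = true <;>
              simp_all

-- ===== VERDICT (by name: the statement is the Claim_ definition above) =====
theorem collect_result_ids_spec : Claim_equal_collect_result_ids := by
  intro rd _ _
  unfold Spec_collect_result_ids collect_result_ids collect_result_ids_alt
  simp only [collect_fold_eq, List.nil_append]
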